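-- pv_equiv track=rewrite | github.com/CameronN8/CUHackit26-The-Longest-Code | pico_interaction/tests/pi_uart_state_sender_test.py | build_mock_game_state_with_tiles
-- ===== SOURCE A (Python) =====
-- def build_mock_game_state_with_tiles(tick: int):
--     # Rotate a deterministic tile pattern so each loop sends changing vector data.
--     resource_cycle = [
--         "wood",
--         "brick",
--         "sheep",
--         "wheat",
--         "ore",
--         "desert",
--         "wood",
--         "sheep",
--         "brick",
--         "ore",
--         "wheat",
--         "wood",
--         "sheep",
--         "brick",
--         "ore",
--         "wheat",
--         "wood",
--         "sheep",
--         "brick",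
--     ]
--     shift = tick % len(resource_cycle)
--     rotated = resource_cycle[shift:] + resource_cycle[:shift]
--     tiles = [{"resource_type": rt} for rt in rotated[:19]]
--     return {"tiles": tiles}
-- ===== SOURCE B (Python) =====
-- def build_mock_game_state_with_tiles(tick: int):
--     # Recursive decomposition: emit one tile at a time, advancing a cursor
--     # through the fixed 19-entry cycle with wraparound; no rotated copy, no slicing.
--     resource_cycle = [
--         "wood", "brick", "sheep", "wheat", "ore", "desert", "wood",
--         "sheep", "brick", "ore", "wheat", "wood", "sheep", "brick",
--         "ore", "wheat", "wood", "sheep", "brick",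
--     ]
--
--     def emit(k: int, count: int):
--         if count == 0:
--             return []
--         return [{"resource_type": resource_cycle[k]}] + emit((k + 1) % 19, count - 1)
--
--     return {"tiles": emit(tick % 19, 19)}
-- ===== Notes on version B (the rewrite author's own statement) =====
-- stated objective: alternative
-- what changed: Replaced the slice-and-concatenate rotation followed by a wrapping comprehension with a recursive emitter that builds the tiles one at a time, advancing a wrapping cursor through the fixed cycle.
import Mathlib
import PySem

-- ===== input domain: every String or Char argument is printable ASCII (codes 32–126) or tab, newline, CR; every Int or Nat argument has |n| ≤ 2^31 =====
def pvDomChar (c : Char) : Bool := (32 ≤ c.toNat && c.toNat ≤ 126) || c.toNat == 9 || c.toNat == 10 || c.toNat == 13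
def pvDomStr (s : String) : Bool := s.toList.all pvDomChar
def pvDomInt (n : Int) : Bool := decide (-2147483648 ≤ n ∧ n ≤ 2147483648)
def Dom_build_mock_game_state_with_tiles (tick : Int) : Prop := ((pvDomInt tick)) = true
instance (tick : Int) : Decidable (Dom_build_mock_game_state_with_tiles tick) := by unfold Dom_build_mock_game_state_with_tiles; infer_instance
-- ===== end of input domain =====

-- B replaces A's slice-and-concatenate rotation by a recursive emitter advancing a wrapping cursor; objective: alternative decomposition.


-- ===== PORT A =====
def pvCycle : List String :=
  ["wood", "brick", "sheep", "wheat", "ore", "desert", "wood", "sheep", "brick", "ore",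
   "wheat", "wood", "sheep", "brick", "ore", "wheat", "wood", "sheep", "brick"]

def build_mock_game_state_with_tiles (tick : Int) : List (String × List (List (String × String))) :=
  let resource_cycle := pvCycle
  let shift := PySem.Int.mod tick (PySem.List.len resource_cycle)
  let rotated := PySem.List.slice resource_cycle (some shift) none ++
                 PySem.List.slice resource_cycle none (some shift)
  let tiles := (PySem.List.slice rotated none (some 19)).map (fun rt => [("resource_type", rt)])
  [("tiles", tiles)]

-- ===== PORT B =====
-- recursive emitter: one tile per step, cursor k wraps modulo 19; index k is always in range,
-- so pyGetD's default is never used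
def pvEmit (k : Int) : Nat → List (List (String × String))
  | 0 => []
  | count + 1 =>
      [("resource_type", PySem.List.pyGetD pvCycle k "")] ::
        pvEmit (PySem.Int.mod (k + 1) 19) count

def build_mock_game_state_with_tiles_alt (tick : Int) : List (String × List (List (String × String))) :=
  [("tiles", pvEmit (PySem.Int.mod tick 19) 19)]

-- ===== PRECONDITION & SPEC =====
def Spec_build_mock_game_state_with_tiles (tick : Int) (out : List (String × List (List (String × String)))) : Prop := out = build_mock_game_state_with_tiles_alt tick
instance (tick : Int) (out : List (String × List (List (String × String)))) : Decidable (Spec_build_mock_game_state_with_tiles tick out) := by unfold Spec_build_mock_game_state_with_tiles; infer_instance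

-- ===== CLAIM (what is proved, stated in full; the proofs are below) =====
def Claim_equal_build_mock_game_state_with_tiles : Prop := ∀ (tick : Int), Dom_build_mock_game_state_with_tiles tick → Spec_build_mock_game_state_with_tiles tick (build_mock_game_state_with_tiles tick)

-- ===== LEMMAS AND PROOFS =====
theorem pvMod19 (x : Int) : PySem.Int.mod x 19 = x % 19 :=
  PySem.Int.mod_eq_emod_of_pos (by norm_num)

theorem pvA_mod (tick : Int) :
    build_mock_game_state_with_tiles (tick % 19) = build_mock_game_state_with_tiles tick := by
  have h : PySem.Int.mod (tick % 19) 19 = PySem.Int.mod tick 19 := by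
    rw [pvMod19, pvMod19]; omega
  simp only [build_mock_game_state_with_tiles]
  have hlen : PySem.List.len pvCycle = 19 := by decide
  rw [hlen, h]

theorem pvB_mod (tick : Int) :
    build_mock_game_state_with_tiles_alt (tick % 19) = build_mock_game_state_with_tiles_alt tick := by
  have h : PySem.Int.mod (tick % 19) 19 = PySem.Int.mod tick 19 := by
    rw [pvMod19, pvMod19]; omega
  simp only [build_mock_game_state_with_tiles_alt, h]

-- ===== VERDICT (by name: the statement is the Claim_ definition above) =====
theorem build_mock_game_state_with_tiles_spec : Claim_equal_build_mock_game_state_with_tiles := by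
  intro tick _
  unfold Spec_build_mock_game_state_with_tiles
  rw [← pvA_mod, ← pvB_mod]
  have h0 : 0 ≤ tick % 19 := Int.emod_nonneg tick (by norm_num)
  have h1 : tick % 19 < 19 := Int.emod_lt_of_pos tick (by norm_num)
  set s := tick % 19 with hs
  interval_cases s <;> decide
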